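-- pv_equiv track=rewrite | github.com/jxwleong/xut-cli | test/test_list.py | get_size_of_element
-- ===== SOURCE A (Python) =====
-- def get_size_of_element(list_, start, end):
--     """
--     Get the size of the element so that we know when to stop if
--     there's more than one devices.
--     The purpose of this is because the key of dictionary must be unique
--     If there're more than one devices, the dictionary will only register the later
--     elements.
--     The workaround is the split devices into separate dictionary
--
--     Args:
--         list_ (list): Value from list(zip(list1, list2)). EX:
--                       graphic_list = [('Name', 'NVIDIA GeForce GTX 960M'), ('Compatibility', 'NVIDIA'), ('RAM', '2.00 GB'),
--                                     ('DAC Type', 'Integrated RAMDAC'), ('Driver Version', '27.21.14.6109'), ('Driver Date', '31/12/2020'),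
--                                     ('Name', 'Intel(R) HD Graphics 530'), ('Compatibility', 'Intel Corporation'), ('RAM', '1.00 GB'),
--                                     ('DAC Type', 'Internal'), ('Driver Version', '20.19.15.4454'), ('Driver Date', '4/5/2016')]
--         start (str): Start key
--         end (str): End key
--
--     Example (start - Name, end - Name):
--         Name: NVIDIA GeForce GTX 960M
--         Compatibility: NVIDIA
--         RAM: 2.00 GB
--         DAC Type: Integrated RAMDAC
--         Driver Version: 27.21.14.6109
--         Driver Date: 31/12/2020
--         Name: Intel(R) HD Graphics 530
--     For this example, the size of the elements is 6.
--     Which will be used to iterated over the list.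
--
--     Returns:
--         int: Size of the elements each devices
--     """
--     START_KEY_FOUND = False
--     count = 0
--     for element in list_:
--         key, value = element
--         if key == start and START_KEY_FOUND is False:
--             START_KEY_FOUND = True
--             count += 1
--         elif key == end and START_KEY_FOUND is True:
--             return count  # Multiply by 2 because it's dict
--         else:
--             count += 1
--     raise Exception(f"\nlist_: {list_}\n"
--                     f"start: {start}\n"
--                     f"end: {end}\n"
--                     f"Either the start or end is NOT in the list_.")
-- ===== SOURCE B (Python) =====
-- def get_size_of_element(list_, start, end):
--     keys = [key for key, value in list_]
--     try:
--         return keys.index(end, keys.index(start) + 1)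
--     except ValueError:
--         raise Exception(f"\nlist_: {list_}\n"
--                         f"start: {start}\n"
--                         f"end: {end}\n"
--                         f"Either the start or end is NOT in the list_.")
-- ===== Notes on version B (the rewrite author's own statement) =====
-- stated objective: idiomatic
-- what changed: A's explicit loop carrying a START_KEY_FOUND flag and a running count is replaced by projecting the keys once and composing two library searches: keys.index(start) and keys.index(end, i+1); the returned value is directly the index of the terminating end key, with no loop or counter in B at all.
import Mathlib
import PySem

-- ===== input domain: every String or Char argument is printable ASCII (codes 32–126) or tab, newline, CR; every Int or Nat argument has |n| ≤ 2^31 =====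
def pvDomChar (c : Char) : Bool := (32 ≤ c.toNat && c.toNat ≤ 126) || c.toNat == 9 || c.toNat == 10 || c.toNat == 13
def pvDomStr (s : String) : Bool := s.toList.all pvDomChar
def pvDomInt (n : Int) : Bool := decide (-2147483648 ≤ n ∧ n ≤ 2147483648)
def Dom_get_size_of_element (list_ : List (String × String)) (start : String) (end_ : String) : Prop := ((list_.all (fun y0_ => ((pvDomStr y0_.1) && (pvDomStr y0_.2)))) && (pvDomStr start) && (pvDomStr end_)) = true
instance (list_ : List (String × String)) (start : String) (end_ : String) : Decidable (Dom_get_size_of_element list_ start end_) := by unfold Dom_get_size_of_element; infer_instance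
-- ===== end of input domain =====

-- B replaces A's flag-and-counter loop by projecting the key list once and composing two library
-- index searches (idiomatic, same O(n) cost); Pre_ excludes the inputs on which the Python raises
-- (no start key, or no end key after the first start key).


-- ===== PORT A =====
-- A's loop: flag START_KEY_FOUND + count; `none` is the final `raise`.
def pvLoopA (start end_ : String) : List (String × String) → Bool → Int → Option Int
  | [], _, _ => none
  | (key, _) :: rest, found, count =>
    if key == start && found == false then pvLoopA start end_ rest true (count + 1)
    else if key == end_ && found == true then some count
    else pvLoopA start end_ rest found (count + 1)

def get_size_of_element (list_ : List (String × String)) (start : String) (end_ : String) : Int :=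
  (pvLoopA start end_ list_ false 0).getD 0   -- `none` = the Python raises; unclaimed (outside Pre_)

-- ===== PORT B =====
-- B: keys = [key for key, value in list_]; keys.index(end, keys.index(start) + 1).
-- keys.index(v, s) searched via index? on the dropped suffix, result re-based to an absolute index.
def get_size_of_element_alt (list_ : List (String × String)) (start : String) (end_ : String) : Int :=
  match PySem.List.index? (list_.map Prod.fst) start with
  | none => 0                                  -- ValueError → the Python raises; unclaimed (outside Pre_)
  | some i =>
    match PySem.List.index? ((list_.map Prod.fst).drop (i + 1)) end_ with
    | none => 0                                -- ValueError → the Python raises; unclaimed (outside Pre_)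
    | some j => (i : Int) + 1 + (j : Int)

-- ===== PRECONDITION & SPEC =====
-- Pre_: the Python A returns normally iff some start key is followed (strictly later) by some end key.
def Pre_get_size_of_element (list_ : List (String × String)) (start : String) (end_ : String) : Prop :=
  ∃ i < list_.length, ∃ j < list_.length, i < j ∧
    list_[i]?.map Prod.fst = some start ∧ list_[j]?.map Prod.fst = some end_
instance (list_ : List (String × String)) (start : String) (end_ : String) : Decidable (Pre_get_size_of_element list_ start end_) := by unfold Pre_get_size_of_element; infer_instance

def pvWitness_get_size_of_element : (List (String × String)) × String × String :=
  ([("Name", "GTX"), ("RAM", "2 GB"), ("Name", "HD 530")], "Name", "Name")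

def Spec_get_size_of_element (list_ : List (String × String)) (start : String) (end_ : String) (out : Int) : Prop := out = get_size_of_element_alt list_ start end_
instance (list_ : List (String × String)) (start : String) (end_ : String) (out : Int) : Decidable (Spec_get_size_of_element list_ start end_ out) := by unfold Spec_get_size_of_element; infer_instance

-- ===== CLAIM (what is proved, stated in full; the proofs are below) =====
def Claim_equal_get_size_of_element : Prop := ∀ (list_ : List (String × String)) (start : String) (end_ : String), Dom_get_size_of_element list_ start end_ → Pre_get_size_of_element list_ start end_ → Spec_get_size_of_element list_ start end_ (get_size_of_element list_ start end_)

-- ===== LEMMAS AND PROOFS =====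

-- Boolean/Option reductions used to unfold one step of A's loop.
theorem pv_tf : (true == false) = false := rfl
theorem pv_tt : (true == true) = true := rfl
theorem pv_ft : (false == true) = false := rfl

-- Once the flag is set, A's remaining loop returns count + (index of the first end key).
theorem pvLoopA_true_eq_index (start end_ : String) :
    ∀ (l : List (String × String)) (count : Int),
      pvLoopA start end_ l true count =
        (PySem.List.index? (l.map Prod.fst) end_).map (fun j => count + (j : Int)) := by
  intro l
  induction l with
  | nil => intro count; rfl
  | cons p rest ih =>
    intro count
    obtain ⟨key, v⟩ := p
    by_cases h : key = end_
    · subst h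
      rw [show ((key, v) :: rest).map Prod.fst = key :: rest.map Prod.fst from rfl,
          PySem.List.index?_cons_self]
      simp [pvLoopA]
    · have hb : (key == end_) = false := by simp [h]
      rw [show ((key, v) :: rest).map Prod.fst = key :: rest.map Prod.fst from rfl,
          PySem.List.index?_cons_of_ne _ h]
      simp only [pvLoopA, pv_tf, pv_tt, Bool.and_false, Bool.false_and, hb,
        Bool.false_eq_true, if_false, ih]
      cases PySem.List.index? (rest.map Prod.fst) end_ with
      | none => simp
      | some j =>
        simp
        ring

-- Before the flag is set, A's loop is B's composition of the two index searches.
theorem pvLoopA_false_eq (start end_ : String) :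
    ∀ (l : List (String × String)) (count : Int),
      pvLoopA start end_ l false count =
        match PySem.List.index? (l.map Prod.fst) start with
        | none => none
        | some i =>
          (PySem.List.index? ((l.map Prod.fst).drop (i + 1)) end_).map
            (fun j => count + (i : Int) + 1 + (j : Int)) := by
  intro l
  induction l with
  | nil => intro count; rfl
  | cons p rest ih =>
    intro count
    obtain ⟨key, v⟩ := p
    by_cases h : key = start
    · subst h
      rw [show ((key, v) :: rest).map Prod.fst = key :: rest.map Prod.fst from rfl,
          PySem.List.index?_cons_self]
      simp only [pvLoopA, Bool.and_true, beq_self_eq_true, if_true,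
        pvLoopA_true_eq_index, List.drop_succ_cons, List.drop_zero, Nat.zero_add]
      cases PySem.List.index? (rest.map Prod.fst) end_ with
      | none => simp
      | some j => simp
    · have hb : (key == start) = false := by simp [h]
      rw [show ((key, v) :: rest).map Prod.fst = key :: rest.map Prod.fst from rfl,
          PySem.List.index?_cons_of_ne _ h]
      simp only [pvLoopA, pv_ft, hb, Bool.false_and, Bool.and_false, Bool.false_eq_true,
        if_false, ih]
      cases PySem.List.index? (rest.map Prod.fst) start with
      | none => simp
      | some i =>
        simp only [Option.map_some, List.drop_succ_cons]
        cases PySem.List.index? ((rest.map Prod.fst).drop (i + 1)) end_ with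
        | none => simp
        | some j =>
          simp
          ring

-- ===== VERDICT (by name: the statement is the Claim_ definition above) =====
theorem get_size_of_element_spec : Claim_equal_get_size_of_element := by
  intro list_ start end_ _ _
  unfold Spec_get_size_of_element get_size_of_element get_size_of_element_alt
  rw [pvLoopA_false_eq]
  cases h : PySem.List.index? (list_.map Prod.fst) start with
  | none => rfl
  | some i =>
    dsimp only
    cases h2 : PySem.List.index? ((list_.map Prod.fst).drop (i + 1)) end_ with
    | none => simp
    | some j => simp
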